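-- pv_equiv track=rewrite | github.com/AClon314/mocap-wrapper | docker/lib.py | continuous
-- ===== SOURCE A (Python) =====
-- from typing import Any, Iterable, Literal, Sequence, TypeVar
--
-- def continuous(List: Sequence[int]) -> list[tuple[int, int]]:
--     """
--     Detect continuous parts in a sorted list.
--
--     Args:
--         List: A sorted list of integers, e.g., [0, 1, 2, 10, 11]
--
--     Returns:
--         list(tuple): Each tuple represents a continuous interval, e.g., [(0, 2), (10, 11)]
--     """
--     if not List:
--         return []
--     result = []
--     start = List[0]
--     end = start
--     for num in List[1:]:
--         if num == end + 1:
--             end = num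
--         else:
--             result.append((start, end))
--             start = num
--             end = num
--     result.append((start, end))
--     return result
-- ===== SOURCE B (Python) =====
-- def continuous(List):
--     """Detect continuous parts in a sorted list: scan back-to-front, merging each
--     element into the most recent interval when adjacent; reverse the buffer once."""
--     rev = []  # intervals in reverse order
--     for num in reversed(List):
--         if rev and rev[-1][0] == num + 1:
--             rev[-1] = (num, rev[-1][1])
--         else:
--             rev.append((num, num))
--     rev.reverse()
--     return rev
-- ===== Notes on version B (the rewrite author's own statement) =====
-- stated objective: alternative
-- what changed: Instead of a forward scan carrying start/end state and appending closed intervals, B traverses the list back-to-front and merges each element into the head interval of the already-built result (a right fold), needing no empty-list guard or pending-run state.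
import Mathlib
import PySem

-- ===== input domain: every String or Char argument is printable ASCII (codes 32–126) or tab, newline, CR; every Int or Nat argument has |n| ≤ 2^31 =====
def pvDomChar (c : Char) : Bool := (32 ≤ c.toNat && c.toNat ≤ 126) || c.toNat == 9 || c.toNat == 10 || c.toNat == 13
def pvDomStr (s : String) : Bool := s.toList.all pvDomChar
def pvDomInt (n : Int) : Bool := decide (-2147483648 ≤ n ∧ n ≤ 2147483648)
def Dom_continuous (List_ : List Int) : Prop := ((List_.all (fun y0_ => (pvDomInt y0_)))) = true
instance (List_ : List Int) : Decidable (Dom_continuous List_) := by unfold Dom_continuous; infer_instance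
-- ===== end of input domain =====

-- B scans back-to-front, merging each element into the most recently added interval of a
-- reversed buffer, and reverses the buffer once at the end; A scans forward carrying
-- start/end state. (objective: alternative)

-- ===== PORT A =====
-- A's forward loop over List[1:], state (start, end, result); result appended at the back.
def contLoopA (rest : List Int) (start e : Int) (acc : List (Int × Int)) : List (Int × Int) :=
  match rest with
  | [] => acc ++ [(start, e)]
  | n :: rs =>
    if n = e + 1 then contLoopA rs start n acc
    else contLoopA rs n n (acc ++ [(start, e)])

def continuous (List_ : List Int) : List (Int × Int) :=
  match List_ with
  | [] => []
  | x :: rest => contLoopA rest x x []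

-- ===== PORT B =====
-- B's per-element step: merge num into the last interval of the reversed buffer when adjacent.
def stepB (rev : List (Int × Int)) (num : Int) : List (Int × Int) :=
  match rev.getLast? with
  | some (a, b) => if a = num + 1 then rev.dropLast ++ [(num, b)] else rev ++ [(num, num)]
  | none => [(num, num)]

def continuous_alt (List_ : List Int) : List (Int × Int) :=
  (List_.reverse.foldl stepB []).reverse

-- ===== PRECONDITION & SPEC =====
def Spec_continuous (List_ : List Int) (out : List (Int × Int)) : Prop := out = continuous_alt List_
instance (List_ : List Int) (out : List (Int × Int)) : Decidable (Spec_continuous List_ out) := by unfold Spec_continuous; infer_instance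

-- ===== CLAIM (what is proved, stated in full; the proofs are below) =====
def Claim_equal_continuous : Prop := ∀ (List_ : List Int), Dom_continuous List_ → Spec_continuous List_ (continuous List_)

-- ===== LEMMAS AND PROOFS =====

-- B's step seen on the output (non-reversed) side: merge num into the head interval.
def mergeB (num : Int) (res : List (Int × Int)) : List (Int × Int) :=
  match res with
  | (a, b) :: rs => if a = num + 1 then (num, b) :: rs else (num, num) :: (a, b) :: rs
  | [] => [(num, num)]

theorem stepB_eq_mergeB (rev : List (Int × Int)) (num : Int) :
    stepB rev num = (mergeB num rev.reverse).reverse := by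
  rcases h : rev.reverse with _ | ⟨⟨a, b⟩, rs⟩
  · have : rev = [] := by simpa using congrArg List.reverse h
    subst this; rfl
  · have hrev : rev = rs.reverse ++ [(a, b)] := by
      have := congrArg List.reverse h; simpa using this
    subst hrev
    simp only [stepB, mergeB, List.getLast?_concat, List.dropLast_concat]
    split_ifs with hif <;> simp

theorem foldl_stepB_eq (ys : List Int) (acc : List (Int × Int)) :
    ys.foldl stepB acc = (ys.foldl (fun r n => mergeB n r) acc.reverse).reverse := by
  induction ys generalizing acc with
  | nil => simp
  | cons n ys ih =>
    simp only [List.foldl]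
    rw [ih (stepB acc n), stepB_eq_mergeB, List.reverse_reverse]

theorem alt_eq_foldr (List_ : List Int) : continuous_alt List_ = List_.foldr mergeB [] := by
  unfold continuous_alt
  rw [foldl_stepB_eq]
  simp [List.foldl_reverse]

-- A's loop without the accumulator: the run list produced from pending run (s, e).
def contRuns (rest : List Int) (s e : Int) : List (Int × Int) :=
  match rest with
  | [] => [(s, e)]
  | n :: rs => if n = e + 1 then contRuns rs s n else (s, e) :: contRuns rs n n

theorem contLoopA_eq_acc_append (rest : List Int) (s e : Int) (acc : List (Int × Int)) :
    contLoopA rest s e acc = acc ++ contRuns rest s e := by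
  induction rest generalizing s e acc with
  | nil => simp [contLoopA, contRuns]
  | cons n rs ih =>
    simp only [contLoopA, contRuns]
    split_ifs with h
    · exact ih s n acc
    · rw [ih n n (acc ++ [(s, e)])]; simp

-- Merging a pending run (s, e) into B's fold of the rest equals A's run list.
theorem contRuns_eq_merge (rest : List Int) (s e : Int) :
    contRuns rest s e =
      match rest.foldr mergeB [] with
      | (a, b) :: rs => if a = e + 1 then (s, b) :: rs else (s, e) :: (a, b) :: rs
      | [] => [(s, e)] := by
  induction rest generalizing s e with
  | nil => simp [contRuns]
  | cons n rs ih =>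
    simp only [contRuns, List.foldr]
    split_ifs with h
    · rw [ih s n]
      rcases hrs : rs.foldr mergeB [] with _ | ⟨⟨a, b⟩, rs'⟩
      · simp [mergeB, h]
      · simp only [mergeB]
        split_ifs with h2 <;> simp [h]
    · rw [ih n n]
      rcases hrs : rs.foldr mergeB [] with _ | ⟨⟨a, b⟩, rs'⟩
      · simp [mergeB, h]
      · simp only [mergeB]
        split_ifs with h2 <;> simp [h]

-- ===== VERDICT (by name: the statement is the Claim_ definition above) =====
theorem continuous_spec : Claim_equal_continuous := by
  intro List_ _
  unfold Spec_continuous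
  rw [alt_eq_foldr]
  cases List_ with
  | nil => rfl
  | cons x rest =>
    show contLoopA rest x x [] = (x :: rest).foldr mergeB []
    rw [contLoopA_eq_acc_append, contRuns_eq_merge]
    simp only [List.foldr, List.nil_append]
    rcases rest.foldr mergeB [] with _ | ⟨⟨a, b⟩, rs'⟩ <;> simp [mergeB]
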